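-- pv_equiv track=rewrite | github.com/recinall/mhci_binding_predictor | gui.py | generate_variants_for_length
-- ===== SOURCE A (Python) =====
-- from typing import List, Dict, Set, Optional
--
-- def generate_variants_for_length(tokens: List[List[str]], length: int) -> Set[str]:
--     variants = set()
--     n = len(tokens)
--     if n < length:
--         return variants
--
--     for start in range(n - length + 1):
--         sequence = tokens[start:start + length]
--
--         def generate_combinations(current: str, index: int):
--             if index == len(sequence):
--                 variants.add(current)
--                 return
--             for option in sequence[index]:
--                 generate_combinations(current + option, index + 1)
--
--         generate_combinations('', 0)
--
--     return variants
-- ===== SOURCE B (Python) =====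
-- def generate_variants_for_length(tokens, length):
--     variants = set()
--     n = len(tokens)
--     if n < length:
--         return variants
--     for start in range(n - length + 1):
--         prods = ['']
--         for options in tokens[start:start + length]:
--             prods = [p + o for p in prods for o in options]
--         variants.update(prods)
--     return variants
-- ===== Notes on version B (the rewrite author's own statement) =====
-- stated objective: simpler
-- what changed: Replaces the nested recursive closure (DFS with an index into the window, mutating the outer set) by an iterative product: per window a list of prefix strings is extended option-list by option-list with a comprehension, then added to the set in one update.
import Mathlib
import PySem

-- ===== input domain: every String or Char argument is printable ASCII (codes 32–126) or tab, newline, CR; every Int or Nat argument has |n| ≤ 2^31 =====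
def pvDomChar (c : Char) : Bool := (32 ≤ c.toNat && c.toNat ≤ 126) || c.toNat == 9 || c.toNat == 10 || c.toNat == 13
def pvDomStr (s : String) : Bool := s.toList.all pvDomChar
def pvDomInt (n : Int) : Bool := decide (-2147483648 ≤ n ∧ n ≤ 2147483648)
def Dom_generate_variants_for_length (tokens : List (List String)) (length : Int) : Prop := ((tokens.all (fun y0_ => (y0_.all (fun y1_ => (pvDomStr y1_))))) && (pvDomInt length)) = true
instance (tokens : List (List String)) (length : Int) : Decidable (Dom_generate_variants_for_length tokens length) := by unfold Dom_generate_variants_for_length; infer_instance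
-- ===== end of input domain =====

-- B replaces A's recursive closure by an iterative per-window product list; equal return value proved.

-- ===== PORT A =====
-- A's nested 'generate_combinations(current, index)': structural recursion on the
-- remaining part of 'sequence' (index advancing = consuming the list), adding to the set.
def pvGenCombA (seq : List (List String)) (current : String) (variants : PySem.Set String) : PySem.Set String :=
  match seq with
  | [] => PySem.Set.add variants current
  | options :: rest => options.foldl (fun v o => pvGenCombA rest (current ++ o) v) variants

def generate_variants_for_length (tokens : List (List String)) (length : Int) : List String :=
  let variants : PySem.Set String := PySem.Set.empty
  let n : Int := tokens.length
  if n < length then variants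
  else
    (PySem.List.pyRange 0 (n - length + 1) 1).foldl
      (fun variants start =>
        pvGenCombA (PySem.List.slice tokens (some start) (some (start + length))) "" variants)
      variants

-- ===== PORT B =====
def generate_variants_for_length_alt (tokens : List (List String)) (length : Int) : List String :=
  let variants : PySem.Set String := PySem.Set.empty
  let n : Int := tokens.length
  if n < length then variants
  else
    (PySem.List.pyRange 0 (n - length + 1) 1).foldl
      (fun variants start =>
        let prods :=
          (PySem.List.slice tokens (some start) (some (start + length))).foldl
            (fun prods options => prods.flatMap (fun p => options.map (fun o => p ++ o))) [""]
        PySem.Set.update variants prods)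
      variants

-- ===== PRECONDITION & SPEC =====
def Spec_generate_variants_for_length (tokens : List (List String)) (length : Int) (out : List String) : Prop := out = generate_variants_for_length_alt tokens length
instance (tokens : List (List String)) (length : Int) (out : List String) : Decidable (Spec_generate_variants_for_length tokens length out) := by unfold Spec_generate_variants_for_length; infer_instance

-- ===== CLAIM (what is proved, stated in full; the proofs are below) =====
def Claim_equal_generate_variants_for_length : Prop := ∀ (tokens : List (List String)) (length : Int), Dom_generate_variants_for_length tokens length → Spec_generate_variants_for_length tokens length (generate_variants_for_length tokens length)

-- ===== LEMMAS AND PROOFS =====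

-- foldl extensionality (pointwise-equal step functions)
theorem pvFoldl_ext {α β : Type} (f g : β → α → β) (h : ∀ v p, f v p = g v p)
    (xs : List α) (v : β) : xs.foldl f v = xs.foldl g v := by
  have : f = g := funext fun v => funext fun p => h v p
  rw [this]

-- folding over a flatMap = nested folds
theorem pvFoldl_flatMap {α β γ : Type} (f : γ → β → γ) (ps : List α) (g : α → List β) (v : γ) :
    (ps.flatMap g).foldl f v = ps.foldl (fun v p => (g p).foldl f v) v := by
  induction ps generalizing v with
  | nil => rfl
  | cons p ps ih => simp [List.flatMap_cons, List.foldl_append, ih]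

-- A's DFS over a window, started from each prefix in ps, equals folding Set.add over
-- B's iteratively built product list seeded with ps.
theorem pvGenComb_eq_prod (seq : List (List String)) (ps : List String) (v : PySem.Set String) :
    (seq.foldl (fun prods options => prods.flatMap (fun p => options.map (fun o => p ++ o))) ps).foldl
      PySem.Set.add v
      = ps.foldl (fun v p => pvGenCombA seq p v) v := by
  induction seq generalizing ps v with
  | nil => exact pvFoldl_ext _ _ (fun v p => by simp [pvGenCombA]) ps v
  | cons options rest ih =>
      simp only [List.foldl_cons]
      rw [ih, pvFoldl_flatMap]
      refine pvFoldl_ext _ _ (fun v p => ?_) ps v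
      simp [pvGenCombA, List.foldl_map]

-- ===== VERDICT (by name: the statement is the Claim_ definition above) =====
theorem generate_variants_for_length_spec : Claim_equal_generate_variants_for_length := by
  intro tokens length _
  unfold Spec_generate_variants_for_length generate_variants_for_length generate_variants_for_length_alt
  by_cases h : (tokens.length : Int) < length
  · simp [h]
  · simp only [h, if_false]
    refine pvFoldl_ext _ _ (fun v start => ?_) _ _
    have := pvGenComb_eq_prod (PySem.List.slice tokens (some start) (some (start + length))) [""] v
    simpa [PySem.Set.update] using this.symm
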